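-- pv_equiv track=rewrite | github.com/axean/tergite-backend | app/libs/storage_file/file.py | _get_subset_dict
-- ===== SOURCE A (Python) =====
-- from typing import Literal, Union, Optional, Any, Dict, List, Tuple, TypedDict
--
-- def _get_subset_dict(
--     data: Dict[str, Any],
--     keys: Tuple[str, ...],
--     defaults: Optional[Dict[str, Any]] = None,
-- ) -> Dict[str, Any]:
--     """Gets a subset of a dictionary having the given keys if they exist"""
--     if defaults is None:
--         defaults = {}
--
--     all_data = {**defaults, **data}
--     return {k: all_data[k] for k in keys if k in all_data}
-- ===== SOURCE B (Python) =====
-- def _get_subset_dict(data, keys, defaults=None):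
--     """Gets a subset of a dictionary having the given keys if they exist"""
--     wanted = set(keys)
--     found = {k: v for k, v in data.items() if k in wanted}
--     for k, v in (defaults or {}).items():
--         if k in wanted and k not in data:
--             found[k] = v
--     return {k: found[k] for k in keys if k in found}
-- ===== Notes on version B (the rewrite author's own statement) =====
-- stated objective: alternative
-- what changed: B inverts the data flow: instead of merging defaults and data into one dict and probing it per requested key, it builds the set of requested keys, scans data once keeping wanted entries, scans defaults once filling wanted keys absent from data, then emits the collected values in key order.
import Mathlib
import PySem

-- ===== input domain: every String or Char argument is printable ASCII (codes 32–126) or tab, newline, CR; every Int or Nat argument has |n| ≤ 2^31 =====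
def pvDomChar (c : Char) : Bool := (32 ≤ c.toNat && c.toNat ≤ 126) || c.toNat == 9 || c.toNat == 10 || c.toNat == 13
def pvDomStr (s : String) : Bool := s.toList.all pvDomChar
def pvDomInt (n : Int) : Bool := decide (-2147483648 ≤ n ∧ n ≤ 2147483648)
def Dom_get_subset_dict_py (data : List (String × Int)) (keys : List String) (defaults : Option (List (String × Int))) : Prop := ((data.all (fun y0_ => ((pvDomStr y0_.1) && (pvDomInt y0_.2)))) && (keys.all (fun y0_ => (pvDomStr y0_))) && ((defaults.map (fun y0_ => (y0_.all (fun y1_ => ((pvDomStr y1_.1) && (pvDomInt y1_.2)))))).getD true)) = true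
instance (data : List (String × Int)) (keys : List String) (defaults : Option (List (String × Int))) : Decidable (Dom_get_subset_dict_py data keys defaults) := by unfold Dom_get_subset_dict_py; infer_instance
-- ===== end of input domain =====

-- B inverts A's data flow: instead of merging the dicts and probing the merge per key, it scans data and defaults once each against the key SET, then assembles the result in key order (alternative decomposition, same cost; no merged dict is built).

-- ===== PORT A =====
-- if defaults is None: defaults = {};  all_data = {**defaults, **data};  {k: all_data[k] for k in keys if k in all_data}
def get_subset_dict_py (data : List (String × Int)) (keys : List String) (defaults : Option (List (String × Int))) : List (String × Int) :=
  let defaultsD : PySem.Dict String Int := PySem.Dict.ofList (defaults.getD [])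
  let all_data : PySem.Dict String Int := defaultsD.update data
  (keys.foldl (fun acc k =>
      match all_data.get? k with
      | some v => acc.insert k v
      | none => acc) PySem.Dict.empty).items

-- ===== PORT B =====
-- wanted = set(keys); found = {k: v for k, v in data.items() if k in wanted};
-- for k, v in (defaults or {}).items(): if k in wanted and k not in data: found[k] = v
-- return {k: found[k] for k in keys if k in found}
def get_subset_dict_py_alt (data : List (String × Int)) (keys : List String) (defaults : Option (List (String × Int))) : List (String × Int) :=
  let dataD : PySem.Dict String Int := PySem.Dict.ofList data
  let wanted : PySem.Set String := PySem.Set.ofList keys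
  let found : PySem.Dict String Int :=
    dataD.items.foldl (fun f p => if wanted.contains p.1 then f.insert p.1 p.2 else f) PySem.Dict.empty
  let defD : PySem.Dict String Int := PySem.Dict.ofList (defaults.getD [])
  let found2 : PySem.Dict String Int :=
    defD.items.foldl (fun f p => if wanted.contains p.1 && !(dataD.contains p.1) then f.insert p.1 p.2 else f) found
  (keys.foldl (fun acc k =>
      match found2.get? k with
      | some v => acc.insert k v
      | none => acc) PySem.Dict.empty).items

-- ===== PRECONDITION & SPEC =====
def Spec_get_subset_dict_py (data : List (String × Int)) (keys : List String) (defaults : Option (List (String × Int))) (out : List (String × Int)) : Prop := out = get_subset_dict_py_alt data keys defaults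
instance (data : List (String × Int)) (keys : List String) (defaults : Option (List (String × Int))) (out : List (String × Int)) : Decidable (Spec_get_subset_dict_py data keys defaults out) := by unfold Spec_get_subset_dict_py; infer_instance

-- ===== CLAIM (what is proved, stated in full; the proofs are below) =====
def Claim_equal_get_subset_dict_py : Prop := ∀ (data : List (String × Int)) (keys : List String) (defaults : Option (List (String × Int))), Dom_get_subset_dict_py data keys defaults → Spec_get_subset_dict_py data keys defaults (get_subset_dict_py data keys defaults)

-- ===== LEMMAS AND PROOFS =====

-- Lookup in a fold of inserts starting from d: the pairs of l win over d, later pairs of l win over earlier ones.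
theorem pv_get?_foldl_insert (l : List (String × Int)) (d : PySem.Dict String Int) (k : String) :
    (l.foldl (fun d p => d.insert p.1 p.2) d).get? k =
      match (l.foldl (fun d p => d.insert p.1 p.2) PySem.Dict.empty).get? k with
      | some v => some v
      | none => d.get? k := by
  induction l generalizing d with
  | nil => simp [PySem.Dict.get?_empty]
  | cons a l ih =>
    simp only [List.foldl_cons]
    rw [ih (d.insert a.1 a.2), ih (PySem.Dict.empty.insert a.1 a.2)]
    cases h : (l.foldl (fun d p => d.insert p.1 p.2) PySem.Dict.empty).get? k with
    | some v => rfl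
    | none =>
      simp only
      rw [PySem.Dict.get?_insert, PySem.Dict.get?_insert, PySem.Dict.get?_empty]
      split <;> rfl

-- The merged dict's lookup is: data first, else defaults.
theorem pv_merge_get? (data : List (String × Int)) (df : List (String × Int)) (k : String) :
    ((PySem.Dict.ofList df).update data).get? k =
      match (PySem.Dict.ofList data).get? k with
      | some v => some v
      | none => (PySem.Dict.ofList df).get? k := by
  have h := pv_get?_foldl_insert data (PySem.Dict.ofList df) k
  simpa [PySem.Dict.update, PySem.Dict.ofList] using h

-- Lookup in a fold of CONDITIONAL inserts: filtered keys behave as in the unconditional fold, the rest see the start dict.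
theorem pv_get?_foldl_cond_insert (c : String → Bool) (l : List (String × Int)) (f0 : PySem.Dict String Int) (k : String) :
    (l.foldl (fun f p => if c p.1 then f.insert p.1 p.2 else f) f0).get? k =
      if c k then (l.foldl (fun f p => f.insert p.1 p.2) f0).get? k else f0.get? k := by
  induction l generalizing f0 with
  | nil => simp
  | cons a l ih =>
    simp only [List.foldl_cons]
    by_cases hca : c a.1 = true
    · rw [if_pos hca, ih (f0.insert a.1 a.2)]
      by_cases hck : c k = true
      · rw [if_pos hck, if_pos hck]
      · rw [if_neg hck, if_neg hck, PySem.Dict.get?_insert]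
        have hne : ¬ (k = a.1) := fun h => hck (h ▸ hca)
        rw [if_neg hne]
    · rw [if_neg hca, ih f0]
      by_cases hck : c k = true
      · have hne : ¬ (k = a.1) := fun h => hca (h ▸ hck)
        rw [if_pos hck, if_pos hck]
        rw [pv_get?_foldl_insert l (f0.insert a.1 a.2) k, pv_get?_foldl_insert l f0 k]
        cases (l.foldl (fun d p => d.insert p.1 p.2) PySem.Dict.empty).get? k with
        | some v => rfl
        | none => simp only; rw [PySem.Dict.get?_insert]; rw [if_neg hne]
      · rw [if_neg hck, if_neg hck]

-- Rebuilding a nodup-keyed dict from its items gives it back.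
theorem pv_ofList_items (d : PySem.Dict String Int) (h : d.keys.Nodup) :
    PySem.Dict.ofList d.items = d := by
  apply PySem.Dict.ext
  have hfresh : ∀ p ∈ d.items, (PySem.Dict.empty : PySem.Dict String Int).contains p.1 = false := by
    intro p _; simp [PySem.Dict.contains_empty]
  have hnodup : (d.items.map (fun p => p.1)).Nodup := h
  have := PySem.Dict.items_foldl_insert_fresh (l := d.items) (k := fun p => p.1) (v := fun p => p.2)
    (d := (PySem.Dict.empty : PySem.Dict String Int)) hfresh hnodup
  simpa [PySem.Dict.ofList, PySem.Dict.update] using this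

-- ===== VERDICT (by name: the statement is the Claim_ definition above) =====
theorem get_subset_dict_py_spec : Claim_equal_get_subset_dict_py := by
  intro data keys defaults _
  unfold Spec_get_subset_dict_py get_subset_dict_py get_subset_dict_py_alt
  simp only
  congr 1
  apply PySem.List.foldl_congr_mem
  intro acc k hk
  rw [pv_merge_get? data (defaults.getD [])]
  rw [pv_get?_foldl_cond_insert (fun s => (PySem.Set.ofList keys).contains s && !(PySem.Dict.ofList data).contains s) _ _ k,
      pv_get?_foldl_cond_insert (fun s => (PySem.Set.ofList keys).contains s) _ _ k]
  have hw : (PySem.Set.ofList keys).contains k = true := by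
    rw [PySem.Set.contains_iff, PySem.Set.mem_ofList]; exact hk
  have hdata : (List.foldl (fun f p => f.insert p.1 p.2) PySem.Dict.empty (PySem.Dict.ofList data).items).get? k
      = (PySem.Dict.ofList data).get? k := by
    have : List.foldl (fun (f : PySem.Dict String Int) p => f.insert p.1 p.2) PySem.Dict.empty (PySem.Dict.ofList data).items
        = PySem.Dict.ofList (PySem.Dict.ofList data).items := rfl
    rw [this, pv_ofList_items _ (PySem.Dict.nodup_keys_ofList data)]
  rw [hw]
  rw [pv_get?_foldl_insert ((PySem.Dict.ofList (defaults.getD [])).items)]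
  have hdef : (List.foldl (fun (f : PySem.Dict String Int) p => f.insert p.1 p.2) PySem.Dict.empty (PySem.Dict.ofList (defaults.getD [])).items)
      = PySem.Dict.ofList (PySem.Dict.ofList (defaults.getD [])).items := rfl
  rw [hdef, pv_ofList_items _ (PySem.Dict.nodup_keys_ofList _), hdata]
  cases hD : (PySem.Dict.ofList data).get? k with
  | some v =>
    have hc : (PySem.Dict.ofList data).contains k = true := by
      rw [PySem.Dict.contains_eq_isSome_get?, hD]; rfl
    rw [hc]; simp
  | none =>
    have hc : (PySem.Dict.ofList data).contains k = false := by
      rw [PySem.Dict.contains_eq_isSome_get?, hD]; rfl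
    rw [hc]
    cases (PySem.Dict.ofList (defaults.getD [])).get? k with
    | some w => simp
    | none =>
      rw [pv_get?_foldl_cond_insert (fun s => (PySem.Set.ofList keys).contains s) ((PySem.Dict.ofList data).items) PySem.Dict.empty k,
          hw, if_pos rfl, hdata, hD]
      simp
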